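-- pv_equiv track=rewrite | github.com/axelthorstein/university-projects | Old Classes/Computer Science/108/A3/poetry_functions.py | pattern_indices
-- ===== SOURCE A (Python) =====
-- def pattern_indices(whole):
--     """ (list of list of str, list of str) -> list of list of int, list of list of int
--
--     Return a list of list of int that represent the index of rhymes in given
--     lines aw well
--
--
--     >>> whole = [['EH1KST', 'AO1F', 'AY1N', 'AO1F'], ['A', 'B', 'B']]
--     >>> pattern_indices(whole)
--     [[[0], [1, 3], [2]], [[0], [1, 2]]]
--     >>> whole = [['EH1KST', 'AO1F'], ['A', 'B', 'A']]
--     >>> pattern_indices(whole)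
--     [[[0], [1]], [[0, 2], [1]]]
--     """
--
--     # Find the index of each rhyming end syllable and group them together
--     # in a list. For all syllables that do not rhyme, put their index in a
--     # list by themselves. Do the same for all rhyme indicators and put
--     # their indices in a list. Return a list with both groupings.
--
--     return_list = []
--     for item in whole:
--         rhymes_dict = {}
--         count = 0
--         for end in item:
--             if not end in rhymes_dict.keys():
--                 rhymes_dict[end] = [count]
--             else:
--                 rhymes_dict[end].append(count)
--             count += 1
--         value = list(rhymes_dict.values())
--         value.sort()
--         return_list.append(value)
--     return return_list
-- ===== SOURCE B (Python) =====
-- def pattern_indices(whole):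
--     return_list = []
--     for line in whole:
--         groups = [[i for i, w in enumerate(line) if w == v]
--                   for v in dict.fromkeys(line)]
--         groups.sort()
--         return_list.append(groups)
--     return return_list
-- ===== Notes on version B (the rewrite author's own statement) =====
-- stated objective: simpler
-- what changed: Replaces A's incremental dict-with-running-counter grouping loop by an ordered dedup of the line plus one enumerate/filter index comprehension per distinct value, then the same final sort.
import Mathlib
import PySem

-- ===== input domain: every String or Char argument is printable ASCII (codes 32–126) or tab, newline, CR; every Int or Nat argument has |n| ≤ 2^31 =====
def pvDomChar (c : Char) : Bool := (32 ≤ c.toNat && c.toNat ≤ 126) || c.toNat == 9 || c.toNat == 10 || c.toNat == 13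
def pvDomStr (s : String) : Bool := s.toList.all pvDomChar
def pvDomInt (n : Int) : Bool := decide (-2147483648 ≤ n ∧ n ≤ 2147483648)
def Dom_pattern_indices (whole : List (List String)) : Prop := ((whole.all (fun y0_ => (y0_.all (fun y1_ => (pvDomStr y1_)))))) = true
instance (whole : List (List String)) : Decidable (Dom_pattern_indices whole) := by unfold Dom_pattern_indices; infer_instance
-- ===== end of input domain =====

-- B replaces A's incremental dict-grouping loop with an ordered dedup of the line's
-- values plus one index-comprehension scan per distinct value (objective: simpler).

-- ===== PORT A =====
-- one line of A: build rhymes_dict with a running count, take its values, sort them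
def pattern_indices_line (item : List String) : List (List Int) :=
  PySem.List.sorted
    ((item.foldl
      (fun (st : PySem.Dict String (List Int) × Int) e =>
        if ¬ (st.1.contains e = true) then (st.1.insert e [st.2], st.2 + 1)
        else (st.1.modify e [] (fun l => l ++ [st.2]), st.2 + 1))
      (PySem.Dict.empty, 0)).1.values)
    (fun x => x) false

def pattern_indices (whole : List (List String)) : List (List (List Int)) :=
  whole.foldl (fun return_list item => return_list ++ [pattern_indices_line item]) []

-- ===== PORT B =====
-- one line of B: per distinct value (first-occurrence order), its indices; then sort
def pattern_indices_line_alt (line : List String) : List (List Int) :=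
  PySem.List.sorted
    ((PySem.List.dedup line).map (fun v =>
      ((PySem.List.enumerate line 0).filter (fun p => p.2 == v)).map (fun p => p.1)))
    (fun x => x) false

def pattern_indices_alt (whole : List (List String)) : List (List (List Int)) :=
  whole.map pattern_indices_line_alt

-- ===== PRECONDITION & SPEC =====
def Spec_pattern_indices (whole : List (List String)) (out : List (List (List Int))) : Prop := out = pattern_indices_alt whole
instance (whole : List (List String)) (out : List (List (List Int))) : Decidable (Spec_pattern_indices whole out) := by unfold Spec_pattern_indices; infer_instance

-- ===== CLAIM (what is proved, stated in full; the proofs are below) =====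
def Claim_equal_pattern_indices : Prop := ∀ (whole : List (List String)), Dom_pattern_indices whole → Spec_pattern_indices whole (pattern_indices whole)

-- ===== LEMMAS AND PROOFS =====

-- A's two branches are both 'modify': inserting a fresh key with [c] is modify with default []
lemma insert_eq_modify (d : PySem.Dict String (List Int)) (e : String) (c : Int)
    (h : d.contains e = false) :
    d.insert e [c] = d.modify e [] (fun l => l ++ [c]) := by
  simp [PySem.Dict.modify, PySem.Dict.insert, h, PySem.Dict.getD_of_not_contains d [] h]

lemma step_eq (d : PySem.Dict String (List Int)) (c : Int) (e : String) :
    (if ¬ (d.contains e = true) then (d.insert e [c], c + 1)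
     else (d.modify e [] (fun l => l ++ [c]), c + 1))
    = (d.modify e [] (fun l => l ++ [c]), c + 1) := by
  by_cases h : d.contains e = true
  · simp [h]
  · simp [h, insert_eq_modify d e c (eq_false_of_ne_true h)]

-- A's counted loop is a fold of modify over the enumeration of the line
lemma foldA_eq_enumerate (item : List String) (d : PySem.Dict String (List Int)) (c : Int) :
    (item.foldl
      (fun (st : PySem.Dict String (List Int) × Int) e =>
        if ¬ (st.1.contains e = true) then (st.1.insert e [st.2], st.2 + 1)
        else (st.1.modify e [] (fun l => l ++ [st.2]), st.2 + 1)) (d, c)).1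
    = (PySem.List.enumerate item c).foldl (fun d p => d.modify p.2 [] (fun l => l ++ [p.1])) d := by
  induction item generalizing d c with
  | nil => simp [PySem.List.enumerate_nil]
  | cons x xs ih =>
      rw [PySem.List.enumerate_cons, List.foldl_cons, List.foldl_cons]
      rw [step_eq]
      exact ih _ _

lemma line_eq (item : List String) : pattern_indices_line item = pattern_indices_line_alt item := by
  unfold pattern_indices_line pattern_indices_line_alt
  rw [foldA_eq_enumerate]
  have hmap : PySem.List.enumerate item 0
      = ((PySem.List.enumerate item 0).map (fun p => (p.2, p.1))).map (fun q => (q.2, q.1)) := by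
    simp [List.map_map, Function.comp_def]
  congr 1
  rw [hmap, List.foldl_map]
  set l' := (PySem.List.enumerate item 0).map (fun p => (p.2, p.1)) with hl'
  have hkeys : ((l'.foldl (fun d q => d.modify q.1 [] (fun l => l ++ [q.2]))
      (PySem.Dict.empty : PySem.Dict String (List Int)))).keys
      = PySem.Set.ofList item := by
    have := PySem.Dict.keys_foldl_modify_key l' (fun q => q.1) ([] : List Int)
      (fun _ q => fun l => l ++ [q.2]) (PySem.Dict.empty)
    simp only [this, PySem.Dict.keys_empty, PySem.Set.update_nil_left]
    congr 1
    simp [hl', List.map_map, Function.comp_def]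
  have hnd : ((l'.foldl (fun d q => d.modify q.1 [] (fun l => l ++ [q.2]))
      (PySem.Dict.empty : PySem.Dict String (List Int)))).keys.Nodup := by
    exact PySem.Dict.nodup_keys_foldl_modify_key l' (fun q => q.1) ([] : List Int)
      (fun _ q => fun l => l ++ [q.2]) PySem.Dict.empty (by simp)
  rw [PySem.Dict.values_eq_map_keys _ hnd ([] : List Int), hkeys]
  have hdedup : PySem.List.dedup item = PySem.Set.ofList item := by simp
  rw [hdedup]
  apply List.map_congr_left
  intro v _
  rw [PySem.Dict.getD_foldl_modify_append l' PySem.Dict.empty v]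
  simp [hl', List.filter_map, List.map_map, Function.comp_def]

-- ===== VERDICT (by name: the statement is the Claim_ definition above) =====
theorem pattern_indices_spec : Claim_equal_pattern_indices := by
  intro whole _
  unfold Spec_pattern_indices pattern_indices pattern_indices_alt
  rw [PySem.List.foldl_append_singleton_eq_map]
  simp [List.map_congr_left fun item _ => line_eq item]
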